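-- pv_equiv track=rewrite | github.com/marketagents-ai/MarketDataGenie | datagenie/tool_use_augmentation/datagen_tool_use.py | _check_sequential_tools
-- ===== SOURCE A (Python) =====
-- from typing import List, Dict, Any, Optional
--
-- def _check_sequential_tools(conv: List[Dict[str, str]]) -> bool:
--     """
--     Return True when every assistant tool‑calling turn is followed only by the
--     corresponding <tool_response> messages from the system before the next
--     assistant <tool_call>. Allow concluding narration after all tool calls are done.
--     """
--     tool_indices = [
--         i
--         for i, m in enumerate(conv)
--         if m["from"] in ("gpt", "assistant") and "<tool_call>" in m["value"].lower()
--     ]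
--
--     # No tool calls at all
--     if not tool_indices:
--         return False
--
--     # Check sequences between tool calls
--     for i in range(len(tool_indices) - 1):
--         start, end = tool_indices[i], tool_indices[i + 1]
--         # Messages strictly between two tool‑calling turns
--         in_between = conv[start + 1 : end]
--         # Only <tool_response> allowed between tool calls
--         if any(m["from"] != "tool" for m in in_between):
--             return False
--
--     # For the last tool call, only check up to the next tool response
--     # (allow narration after that)
--     last_tool_idx = tool_indices[-1]
--     next_responses = [
--         i
--         for i, m in enumerate(conv[last_tool_idx + 1 :], start=last_tool_idx + 1)
--         if m["from"] == "tool"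
--     ]
--     if not next_responses:  # No tool response after last tool call
--         return False
--
--     # Check sequence after last tool call up to its response
--     last_response_idx = next_responses[0]
--     in_between = conv[last_tool_idx + 1 : last_response_idx + 1]
--     if any(m["from"] != "tool" for m in in_between):
--         return False
--
--     return True
-- ===== SOURCE B (Python) =====
-- def _check_sequential_tools(conv):
--     """Single forward pass carrying a small state instead of collecting indices
--     and re-scanning slices."""
--     found_call = False      # at least one tool call seen
--     between_ok = True       # every gap between two consecutive calls was all-'tool'
--     run_all_tool = True     # every message since the last call (so far) is from 'tool'
--     after_first = None      # 'from' of the first message after the last call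
--     for m in conv:
--         f = m["from"]
--         if f in ("gpt", "assistant") and "<tool_call>" in m["value"].lower():
--             if found_call and not run_all_tool:
--                 between_ok = False
--             found_call = True
--             run_all_tool = True
--             after_first = None
--         elif found_call:
--             if after_first is None:
--                 after_first = f
--             if f != "tool":
--                 run_all_tool = False
--     return found_call and between_ok and after_first == "tool"
-- ===== Notes on version B (the rewrite author's own statement) =====
-- stated objective: alternative
-- what changed: A collects all tool-call indices, then re-scans slices between consecutive indices and after the last one; B is a single forward fold over the conversation carrying a 4-field state (found_call, between_ok, run_all_tool, after_first), so no index lists or slices are built.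
import Mathlib
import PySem

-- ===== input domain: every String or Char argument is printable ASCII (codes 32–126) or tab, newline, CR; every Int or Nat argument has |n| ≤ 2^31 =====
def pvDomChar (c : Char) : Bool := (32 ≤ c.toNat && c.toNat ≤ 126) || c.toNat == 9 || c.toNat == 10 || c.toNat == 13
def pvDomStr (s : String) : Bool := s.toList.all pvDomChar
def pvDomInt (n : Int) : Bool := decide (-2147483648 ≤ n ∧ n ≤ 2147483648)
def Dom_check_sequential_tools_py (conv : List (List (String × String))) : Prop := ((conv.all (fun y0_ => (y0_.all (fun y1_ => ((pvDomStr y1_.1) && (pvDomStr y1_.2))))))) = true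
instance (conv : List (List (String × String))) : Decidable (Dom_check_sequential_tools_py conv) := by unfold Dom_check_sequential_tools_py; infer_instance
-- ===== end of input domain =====

-- B replaces A's collect-indices-then-rescan-slices strategy by a single forward pass
-- carrying a small state (objective: alternative/simpler traversal; equivalence is about
-- the return value; neither version mutates its argument).

-- shared message accessors (Python m[k]; total via getD "" — Pre_ excludes missing keys)
def pvGet (m : List (String × String)) (k : String) : String :=
  ((PySem.Dict.mk m).get? k).getD ""

-- m["from"] in ("gpt","assistant") and "<tool_call>" in m["value"].lower()
def pvIsCall (m : List (String × String)) : Bool :=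
  (pvGet m "from" == "gpt" || pvGet m "from" == "assistant") &&
  PySem.Str.isIn "<tool_call>" (PySem.Str.lower (pvGet m "value"))

-- ===== PORT A =====
def check_sequential_tools_py (conv : List (List (String × String))) : Bool :=
  let tool_indices : List Int :=
    ((PySem.List.enumerate conv 0).filter (fun im => pvIsCall im.2)).map (fun im => im.1)
  if tool_indices.isEmpty then false
  else if ((List.range (tool_indices.length - 1)).any (fun i =>
      (PySem.List.slice conv (some (tool_indices[i]! + 1)) (some tool_indices[i+1]!)).any
        (fun m => !(pvGet m "from" == "tool")))) then false
  else
    let last_tool_idx := PySem.List.pyGetD tool_indices (-1) 0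
    let next_responses : List Int :=
      ((PySem.List.enumerate (PySem.List.slice conv (some (last_tool_idx + 1)) none)
          (last_tool_idx + 1)).filter (fun im => pvGet im.2 "from" == "tool")).map (fun im => im.1)
    if next_responses.isEmpty then false
    else
      let last_response_idx := PySem.List.pyGetD next_responses 0 0
      if (PySem.List.slice conv (some (last_tool_idx + 1)) (some (last_response_idx + 1))).any
          (fun m => !(pvGet m "from" == "tool")) then false
      else true

-- ===== PORT B =====
-- state: (found_call, between_ok, run_all_tool, after_first)
def pvStepB (st : Bool × Bool × Bool × Option String) (m : List (String × String)) :
    Bool × Bool × Bool × Option String :=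
  let f := pvGet m "from"
  if (f == "gpt" || f == "assistant") && PySem.Str.isIn "<tool_call>" (PySem.Str.lower (pvGet m "value")) then
    (true, if st.1 && !st.2.2.1 then false else st.2.1, true, none)
  else if st.1 then
    (st.1, st.2.1, st.2.2.1 && (f == "tool"),
      match st.2.2.2 with | none => some f | some v => some v)
  else st

def check_sequential_tools_py_alt (conv : List (List (String × String))) : Bool :=
  let st := conv.foldl pvStepB (false, true, true, none)
  st.1 && st.2.1 && (st.2.2.2 == some "tool")

-- ===== PRECONDITION & SPEC =====
-- Pre_ excludes exactly the inputs where Python raises KeyError: a message without a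
-- "from" key, or a "gpt"/"assistant" message without a "value" key.
def Pre_check_sequential_tools_py (conv : List (List (String × String))) : Prop :=
  ∀ m ∈ conv, ((PySem.Dict.mk m).get? "from").isSome = true ∧
    (((PySem.Dict.mk m).get? "from" = some "gpt" ∨ (PySem.Dict.mk m).get? "from" = some "assistant") →
      ((PySem.Dict.mk m).get? "value").isSome = true)
instance (conv : List (List (String × String))) : Decidable (Pre_check_sequential_tools_py conv) := by
  unfold Pre_check_sequential_tools_py; infer_instance

def pvWitness_check_sequential_tools_py : (List (List (String × String))) :=
  [[("from", "gpt"), ("value", "<tool_call>")], [("from", "tool"), ("value", "ok")]]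

def Spec_check_sequential_tools_py (conv : List (List (String × String))) (out : Bool) : Prop := out = check_sequential_tools_py_alt conv
instance (conv : List (List (String × String))) (out : Bool) : Decidable (Spec_check_sequential_tools_py conv out) := by unfold Spec_check_sequential_tools_py; infer_instance

-- ===== CLAIM (what is proved, stated in full; the proofs are below) =====
def Claim_equal_check_sequential_tools_py : Prop := ∀ (conv : List (List (String × String))), Dom_check_sequential_tools_py conv → Pre_check_sequential_tools_py conv → Spec_check_sequential_tools_py conv (check_sequential_tools_py conv)

-- ===== LEMMAS AND PROOFS =====

def pvIsToolM (m : List (String × String)) : Bool := pvGet m "from" == "tool"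
def pvNT (m : List (String × String)) : Bool := !(pvGet m "from" == "tool")

-- [i for i,m in enumerate(xs, s) if p m]
def pvIdxOf {α : Type} (p : α → Bool) (xs : List α) (s : Int) : List Int :=
  ((PySem.List.enumerate xs s).filter (fun im => p im.2)).map (fun im => im.1)

-- any over consecutive pairs of an index list
def pvChainAny (P : Int → Int → Bool) : List Int → Bool
  | a :: b :: t => P a b || pvChainAny P (b :: t)
  | _ => false

def pvP (conv : List (List (String × String))) (a b : Int) : Bool :=
  (PySem.List.slice conv (some (a + 1)) (some b)).any pvNT

def pvTI (conv : List (List (String × String))) : List Int := pvIdxOf pvIsCall conv 0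

-- the part of A after the between-loop, as a function of the last call index
def pvTail (conv : List (List (String × String))) (L : Int) : Bool :=
  let nr := pvIdxOf pvIsToolM (PySem.List.slice conv (some (L + 1)) none) (L + 1)
  if nr.isEmpty then false
  else if (PySem.List.slice conv (some (L + 1)) (some (PySem.List.pyGetD nr 0 0 + 1))).any pvNT then false
  else true

-- -------- pvIdxOf lemmas --------
lemma pvIdxOf_nil {α : Type} (p : α → Bool) (s : Int) : pvIdxOf p [] s = [] := rfl

lemma pvIdxOf_cons {α : Type} (p : α → Bool) (x : α) (xs : List α) (s : Int) :
    pvIdxOf p (x :: xs) s = if p x then s :: pvIdxOf p xs (s + 1) else pvIdxOf p xs (s + 1) := by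
  simp only [pvIdxOf, PySem.List.enumerate_cons, List.filter_cons]
  split <;> simp

lemma pvIdxOf_append {α : Type} (p : α → Bool) (t z : List α) (s : Int) :
    pvIdxOf p (t ++ z) s = pvIdxOf p t s ++ pvIdxOf p z (s + t.length) := by
  simp [pvIdxOf, PySem.List.enumerate_append]

lemma pvIdxOf_shift {α : Type} (p : α → Bool) (xs : List α) (s : Int) :
    pvIdxOf p xs s = (pvIdxOf p xs 0).map (· + s) := by
  induction xs generalizing s with
  | nil => simp [pvIdxOf_nil]
  | cons x xs ih =>
    rw [pvIdxOf_cons, pvIdxOf_cons, ih (s + 1), ih (0 + 1)]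
    by_cases hp : p x <;> simp [hp, List.map_map] <;> intros <;> omega

lemma mem_pvIdxOf_ge {α : Type} (p : α → Bool) (xs : List α) (s : Int) (k : Int)
    (h : k ∈ pvIdxOf p xs s) : s ≤ k := by
  simp only [pvIdxOf, List.mem_map, List.mem_filter] at h
  obtain ⟨⟨i, m⟩, ⟨hm, _⟩, rfl⟩ := h
  rw [PySem.List.mem_enumerate_iff] at hm
  obtain ⟨j, hj, hp⟩ := hm
  cases hp
  simp

lemma pvIdxOf_eq_nil {α : Type} (p : α → Bool) (xs : List α) (s : Int)
    (h : ∀ m ∈ xs, p m = false) : pvIdxOf p xs s = [] := by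
  induction xs generalizing s with
  | nil => rfl
  | cons x t ih =>
    rw [pvIdxOf_cons]
    simp [h x (by simp), ih (s + 1) (fun m hm => h m (by simp [hm]))]

-- -------- chainAny lemmas --------
lemma pvRangeAnyPairs (P : Int → Int → Bool) :
    ∀ l : List Int, (List.range (l.length - 1)).any (fun i => P l[i]! l[i+1]!) = pvChainAny P l := by
  intro l
  induction l with
  | nil => simp [pvChainAny]
  | cons a t ih =>
    cases t with
    | nil => simp [pvChainAny]
    | cons b t' =>
      rw [show (a :: b :: t').length - 1 = t'.length + 1 by simp]
      rw [List.range_succ_eq_map]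
      rw [show pvChainAny P (a :: b :: t') = (P a b || pvChainAny P (b :: t')) from rfl]
      rw [show (b :: t').length - 1 = t'.length by simp] at ih
      rw [← ih]
      simp [List.any_cons, List.any_map, Function.comp_def, Nat.succ_eq_add_one]

lemma pvChainAny_map_congr (P Q : Int → Int → Bool) (f : Int → Int) :
    ∀ l : List Int, (∀ a ∈ l, ∀ b ∈ l, P (f a) (f b) = Q a b) →
      pvChainAny P (l.map f) = pvChainAny Q l := by
  intro l
  induction l with
  | nil => simp [pvChainAny]
  | cons a t ih =>
    cases t with
    | nil => simp [pvChainAny]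
    | cons b t' =>
      intro h
      simp only [List.map_cons, pvChainAny]
      rw [show (f b :: t'.map f) = (b :: t').map f by simp]
      rw [ih (fun x hx y hy => h x (by simp at hx ⊢; tauto) y (by simp at hy ⊢; tauto))]
      rw [h a (by simp) b (by simp)]

-- -------- slice shift lemmas --------
lemma pvSliceShift {α : Type} (pre z : List α) (a b : Int) (ha : 0 ≤ a) (hb : 0 ≤ b) :
    PySem.List.slice (pre ++ z) (some (a + pre.length)) (some (b + pre.length)) =
      PySem.List.slice z (some a) (some b) := by
  rw [PySem.List.slice_toNat _ (by omega) (by omega), PySem.List.slice_toNat _ ha hb]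
  have h1 : (a + (pre.length : Int)).toNat = pre.length + a.toNat := by omega
  have h2 : (b + (pre.length : Int)).toNat - (a + (pre.length : Int)).toNat = b.toNat - a.toNat := by omega
  rw [h2, h1, List.drop_length_add_append]

lemma pvSliceShiftFrom {α : Type} (pre z : List α) (a : Int) (ha : 0 ≤ a) :
    PySem.List.slice (pre ++ z) (some (a + pre.length)) none = PySem.List.slice z (some a) none := by
  rw [PySem.List.slice_from _ (by omega), PySem.List.slice_from _ ha]
  have h1 : (a + (pre.length : Int)).toNat = pre.length + a.toNat := by omega
  rw [h1, List.drop_length_add_append]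

-- -------- normal form of port A --------
lemma A_eq_form (conv : List (List (String × String))) :
    check_sequential_tools_py conv =
      (if (pvTI conv).isEmpty then false
       else if pvChainAny (pvP conv) (pvTI conv) then false
       else pvTail conv (PySem.List.pyGetD (pvTI conv) (-1) 0)) := by
  rw [show pvChainAny (pvP conv) (pvTI conv)
        = (List.range ((pvTI conv).length - 1)).any (fun i =>
            (PySem.List.slice conv (some ((pvTI conv)[i]! + 1)) (some (pvTI conv)[i+1]!)).any
              (fun m => !(pvGet m "from" == "tool")))
      from (pvRangeAnyPairs _ _).symm]
  rfl

-- -------- tail lemmas --------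
lemma pvTail_shift (pre z : List (List (String × String))) (L : Int) (hL : 0 ≤ L) :
    pvTail (pre ++ z) (L + pre.length) = pvTail z L := by
  have hsl : PySem.List.slice (pre ++ z) (some (L + (pre.length : Int) + 1)) none
      = PySem.List.slice z (some (L + 1)) none := by
    rw [show L + (pre.length : Int) + 1 = (L + 1) + pre.length by ring,
      pvSliceShiftFrom pre z (L + 1) (by omega)]
  simp only [pvTail, hsl]
  rw [pvIdxOf_shift pvIsToolM _ (L + ↑pre.length + 1), pvIdxOf_shift pvIsToolM _ (L + 1)]
  cases h0 : pvIdxOf pvIsToolM (PySem.List.slice z (some (L + 1)) none) 0 with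
  | nil => simp
  | cons k t =>
    have hk : 0 ≤ k := mem_pvIdxOf_ge _ _ _ _ (by rw [h0]; exact List.mem_cons_self ..)
    simp only [List.map_cons, List.isEmpty_cons, PySem.List.pyGetD_zero_cons,
      Bool.false_eq_true, if_false]
    have hfin : PySem.List.slice (pre ++ z) (some (L + ↑pre.length + 1))
          (some (k + (L + ↑pre.length + 1) + 1))
        = PySem.List.slice z (some (L + 1)) (some (k + (L + 1) + 1)) := by
      rw [show L + (pre.length : Int) + 1 = (L + 1) + pre.length by ring,
        show k + ((L + 1) + (pre.length : Int)) + 1 = (k + (L + 1) + 1) + pre.length by ring,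
        pvSliceShift pre z (L + 1) (k + (L + 1) + 1) (by omega) (by omega)]
    rw [hfin]

lemma pvTail_cons_zero (m : List (String × String)) (xs : List (List (String × String))) :
    pvTail (m :: xs) 0 = (match xs with | [] => false | h :: _ => pvIsToolM h) := by
  have hslice : PySem.List.slice (m :: xs) (some ((1 : Int))) none = xs := by
    rw [PySem.List.slice_from _ (by omega)]
    norm_num
  cases xs with
  | nil => simp [pvTail, hslice, pvIdxOf_nil]
  | cons h r =>
    by_cases hh : pvIsToolM h
    · have hh' : pvGet h "from" = "tool" := by simpa [pvIsToolM] using hh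
      have hs2 : PySem.List.slice (m :: h :: r) (some ((1 : Int))) (some ((2 : Int))) = [h] := by
        rw [PySem.List.slice_toNat _ (by omega) (by omega)]
        rfl
      simp [pvTail, hslice, pvIdxOf_cons, hh, hh', hs2, pvNT, PySem.List.pyGetD_zero_cons]
    · cases hnr : pvIdxOf pvIsToolM r 2 with
      | nil => simp [pvTail, hslice, pvIdxOf_cons, hh, hnr]
      | cons k w =>
        have hk : (2 : Int) ≤ k :=
          mem_pvIdxOf_ge _ _ _ _ (by rw [hnr]; exact List.mem_cons_self ..)
        have hs3 : PySem.List.slice (m :: h :: r) (some ((1 : Int))) (some (k + 1))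
            = h :: r.take (k.toNat - 1) := by
          rw [PySem.List.slice_toNat _ (by omega) (by omega)]
          have h2 : (k + 1).toNat - (1 : Int).toNat = (k.toNat - 1) + 1 := by omega
          rw [h2]
          simp [List.take_succ_cons]
        have hh' : ¬ pvGet h "from" = "tool" := by simpa [pvIsToolM] using hh
        simp [pvTail, hslice, pvIdxOf_cons, hh, hh', hnr, hs3, pvNT, PySem.List.pyGetD_zero_cons]

-- -------- pvTI structure --------
lemma pvTI_cons (m : List (String × String)) (xs : List (List (String × String))) :
    pvTI (m :: xs) = if pvIsCall m then 0 :: (pvTI xs).map (· + 1) else (pvTI xs).map (· + 1) := by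
  rw [pvTI, pvIdxOf_cons, pvIdxOf_shift pvIsCall xs (0 + 1)]
  norm_num [pvTI]

lemma pvTI_nil_of_callfree (xs : List (List (String × String)))
    (h : ∀ m ∈ xs, pvIsCall m = false) : pvTI xs = [] := pvIdxOf_eq_nil _ _ _ h

lemma mem_pvTI_nonneg (conv : List (List (String × String))) (a : Int) (h : a ∈ pvTI conv) :
    0 ≤ a := mem_pvIdxOf_ge _ _ _ _ h

-- -------- structural lemmas about A --------
lemma A_noCall (conv : List (List (String × String))) (h : pvTI conv = []) :
    check_sequential_tools_py conv = false := by
  rw [A_eq_form, h]; rfl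

lemma pvLastShift (l : List Int) (c : Int) (hl : l ≠ []) :
    PySem.List.pyGetD (l.map (· + c)) (-1) 0 = PySem.List.pyGetD l (-1) 0 + c := by
  rw [PySem.List.pyGetD_neg_one _ _ (by simp [hl]), PySem.List.pyGetD_neg_one _ _ hl]
  have h1 : (l.map (· + c)).getLast? = (l.getLast?).map (· + c) := List.getLast?_map
  rw [List.getLast?_eq_some_getLast (by simp [hl]), List.getLast?_eq_some_getLast hl] at h1
  simpa using h1

lemma pvFirstCall : ∀ xs : List (List (String × String)),
    (¬ ∀ m' ∈ xs, pvIsCall m' = false) →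
    ∃ t x ys, xs = t ++ x :: ys ∧ (∀ m' ∈ t, pvIsCall m' = false) ∧ pvIsCall x = true := by
  intro xs
  induction xs with
  | nil =>
    intro h
    exact absurd (fun m hm => absurd hm (by simp)) h
  | cons m xs ih =>
    intro h
    by_cases hm : pvIsCall m
    · exact ⟨[], m, xs, by simp, by simp, hm⟩
    · have hxs : ¬ ∀ m' ∈ xs, pvIsCall m' = false := by
        intro hall
        apply h
        intro m' hm'
        rcases List.mem_cons.mp hm' with rfl | h'
        · simpa using hm
        · exact hall m' h'
      obtain ⟨t, x, ys, rfl, ht, hx⟩ := ih hxs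
      refine ⟨m :: t, x, ys, rfl, ?_, hx⟩
      intro m' hm'
      rcases List.mem_cons.mp hm' with rfl | h'
      · simpa using hm
      · exact ht m' h'

lemma A_prefix (t : List (List (String × String))) (x : List (String × String))
    (ys : List (List (String × String)))
    (ht : ∀ m ∈ t, pvIsCall m = false) (hx : pvIsCall x = true) :
    check_sequential_tools_py (t ++ x :: ys) = check_sequential_tools_py (x :: ys) := by
  have hT : pvTI (t ++ x :: ys) = (pvTI (x :: ys)).map (· + (t.length : Int)) := by
    rw [pvTI, pvIdxOf_append, pvIdxOf_eq_nil pvIsCall t 0 ht,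
      pvIdxOf_shift pvIsCall (x :: ys) (0 + t.length)]
    norm_num [pvTI]
  have hcons : pvTI (x :: ys) = 0 :: (pvTI ys).map (· + 1) := by rw [pvTI_cons, if_pos hx]
  have hmem : ∀ a ∈ pvTI (x :: ys), 0 ≤ a := fun a ha => mem_pvTI_nonneg _ a ha
  have hne : pvTI (x :: ys) ≠ [] := by rw [hcons]; simp
  rw [A_eq_form, A_eq_form, hT]
  have hchain : pvChainAny (pvP (t ++ x :: ys)) ((pvTI (x :: ys)).map (· + (t.length : Int)))
      = pvChainAny (pvP (x :: ys)) (pvTI (x :: ys)) := by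
    apply pvChainAny_map_congr
    intro a ha b hb
    have ha0 : 0 ≤ a := hmem a ha
    have hb0 : 0 ≤ b := hmem b hb
    show pvP (t ++ x :: ys) (a + t.length) (b + t.length) = pvP (x :: ys) a b
    unfold pvP
    rw [show a + (t.length : Int) + 1 = (a + 1) + t.length by ring,
      pvSliceShift t (x :: ys) (a + 1) b (by omega) hb0]
  rw [hchain, pvLastShift (pvTI (x :: ys)) (t.length : Int) hne]
  have hL0 : 0 ≤ PySem.List.pyGetD (pvTI (x :: ys)) (-1) 0 := by
    apply hmem
    rw [PySem.List.pyGetD_neg_one _ _ hne]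
    exact List.getLast_mem hne
  rw [pvTail_shift t (x :: ys) _ hL0, List.isEmpty_map]

lemma A_split (m : List (String × String)) (t : List (List (String × String)))
    (x : List (String × String)) (ys : List (List (String × String)))
    (hm : pvIsCall m = true) (ht : ∀ m' ∈ t, pvIsCall m' = false) (hx : pvIsCall x = true) :
    check_sequential_tools_py (m :: (t ++ x :: ys)) =
      (t.all pvIsToolM && check_sequential_tools_py (x :: ys)) := by
  have hpre : (m :: (t ++ x :: ys)) = (m :: t) ++ (x :: ys) := by simp
  have hTpre : pvIdxOf pvIsCall (m :: t) 0 = [0] := by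
    rw [pvIdxOf_cons, if_pos hm, pvIdxOf_eq_nil pvIsCall t (0 + 1) ht]
  have hT : pvTI ((m :: t) ++ x :: ys)
      = 0 :: (pvTI (x :: ys)).map (· + ((m :: t).length : Int)) := by
    rw [pvTI, pvIdxOf_append, hTpre, pvIdxOf_shift pvIsCall (x :: ys) (0 + (m :: t).length)]
    norm_num [pvTI]
  have hcons : pvTI (x :: ys) = 0 :: (pvTI ys).map (· + 1) := by rw [pvTI_cons, if_pos hx]
  have hmem : ∀ a ∈ pvTI (x :: ys), 0 ≤ a := fun a ha => mem_pvTI_nonneg _ a ha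
  have hne : pvTI (x :: ys) ≠ [] := by rw [hcons]; simp
  have hnem : (pvTI (x :: ys)).map (· + ((m :: t).length : Int)) ≠ [] := by simp [hne]
  rw [hpre, A_eq_form, A_eq_form, hT]
  -- the chain over the extended index list
  have hchainrest : pvChainAny (pvP ((m :: t) ++ x :: ys))
        ((pvTI (x :: ys)).map (· + ((m :: t).length : Int)))
      = pvChainAny (pvP (x :: ys)) (pvTI (x :: ys)) := by
    apply pvChainAny_map_congr
    intro a ha b hb
    have ha0 : 0 ≤ a := hmem a ha
    have hb0 : 0 ≤ b := hmem b hb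
    show pvP ((m :: t) ++ x :: ys) (a + (m :: t).length) (b + (m :: t).length) = pvP (x :: ys) a b
    unfold pvP
    rw [show a + ((m :: t).length : Int) + 1 = (a + 1) + (m :: t).length by ring,
      pvSliceShift (m :: t) (x :: ys) (a + 1) b (by omega) hb0]
  -- head pair of the chain: the slice between index 0 and the first call of xs
  have hheadslice : PySem.List.slice ((m :: t) ++ x :: ys) (some ((0 : Int) + 1))
        (some ((0 : Int) + ((m :: t).length : Int))) = t := by
    rw [PySem.List.slice_toNat _ (by omega) (by omega)]
    have h2 : ((0 : Int) + ((m :: t).length : Int)).toNat - ((0 : Int) + 1).toNat = t.length := by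
      simp
    have h1 : ((0 : Int) + 1).toNat = 1 := by norm_num
    rw [h2, h1]
    simp [List.cons_append, List.take_left]
  have hanyall : ∀ u : List (List (String × String)), u.any pvNT = !u.all pvIsToolM := by
    intro u
    induction u with
    | nil => rfl
    | cons a u ih => simp [pvNT, pvIsToolM, List.any_cons, List.all_cons, ih, Bool.not_and]
  have hheadP : pvP ((m :: t) ++ x :: ys) 0 (0 + ((m :: t).length : Int)) = !t.all pvIsToolM := by
    unfold pvP
    rw [hheadslice, hanyall t]
  -- the whole chain
  have hchain : pvChainAny (pvP ((m :: t) ++ x :: ys))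
        (0 :: (pvTI (x :: ys)).map (· + ((m :: t).length : Int)))
      = (!t.all pvIsToolM || pvChainAny (pvP (x :: ys)) (pvTI (x :: ys))) := by
    rw [hcons]
    rw [show pvChainAny (pvP ((m :: t) ++ x :: ys))
          (0 :: ((0 :: (pvTI ys).map (· + 1)).map (· + ((m :: t).length : Int))))
        = (pvP ((m :: t) ++ x :: ys) 0 (0 + ((m :: t).length : Int))
           || pvChainAny (pvP ((m :: t) ++ x :: ys))
                ((0 :: (pvTI ys).map (· + 1)).map (· + ((m :: t).length : Int)))) from rfl]
    rw [hheadP, ← hcons, hchainrest]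
  -- the last index
  have hlast : PySem.List.pyGetD (0 :: (pvTI (x :: ys)).map (· + ((m :: t).length : Int))) (-1) 0
      = PySem.List.pyGetD (pvTI (x :: ys)) (-1) 0 + ((m :: t).length : Int) := by
    rw [PySem.List.pyGetD_neg_one _ _ (by simp), PySem.List.pyGetD_neg_one _ _ hne]
    rw [List.getLast_cons hnem]
    have h1 : ((pvTI (x :: ys)).map (· + ((m :: t).length : Int))).getLast? =
        ((pvTI (x :: ys)).getLast?).map (· + ((m :: t).length : Int)) := List.getLast?_map
    rw [List.getLast?_eq_some_getLast (by simp [hne]), List.getLast?_eq_some_getLast hne] at h1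
    simpa using h1
  have hL0 : 0 ≤ PySem.List.pyGetD (pvTI (x :: ys)) (-1) 0 := by
    apply hmem
    rw [PySem.List.pyGetD_neg_one _ _ hne]
    exact List.getLast_mem hne
  rw [hchain, hlast, pvTail_shift (m :: t) (x :: ys) _ hL0]
  simp only [List.isEmpty_cons, Bool.false_eq_true, if_false]
  rw [show (pvTI (x :: ys)).isEmpty = false from by simp [hne]]
  simp only [Bool.false_eq_true, if_false]
  cases hall : t.all pvIsToolM <;>
    cases hch : pvChainAny (pvP (x :: ys)) (pvTI (x :: ys)) <;> simp [hall, hch]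

-- -------- the common spec automaton --------
inductive PvSt | c | tt | dead (b : Bool)

def pvSpec : PvSt → List (List (String × String)) → Bool
  | .c, [] => false
  | .c, m :: xs => if pvIsCall m then pvSpec .c xs
      else if pvIsToolM m then pvSpec .tt xs else pvSpec (.dead false) xs
  | .tt, [] => true
  | .tt, m :: xs => if pvIsCall m then pvSpec .c xs
      else if pvIsToolM m then pvSpec .tt xs else pvSpec (.dead true) xs
  | .dead b, [] => b
  | .dead b, m :: xs => if pvIsCall m then false else pvSpec (.dead b) xs

def pvSpec0 : List (List (String × String)) → Bool
  | [] => false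
  | m :: xs => if pvIsCall m then pvSpec .c xs else pvSpec0 xs

lemma pvSpec_dead_callfree (b : Bool) (xs : List (List (String × String)))
    (h : ∀ m ∈ xs, pvIsCall m = false) : pvSpec (.dead b) xs = b := by
  induction xs with
  | nil => rfl
  | cons m t ih => simp [pvSpec, h m (by simp), ih (fun m' hm' => h m' (by simp [hm']))]

lemma pvSpec_tt_callfree (xs : List (List (String × String)))
    (h : ∀ m ∈ xs, pvIsCall m = false) : pvSpec .tt xs = true := by
  cases xs with
  | nil => rfl
  | cons m t =>
    have ht : ∀ m' ∈ t, pvIsCall m' = false := fun m' hm' => h m' (by simp [hm'])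
    simp [pvSpec, h m (by simp)]
    by_cases hm : pvIsToolM m
    · simp [hm, pvSpec_tt_callfree t ht]
    · simp [hm, pvSpec_dead_callfree true t ht]
termination_by xs.length

lemma pvSpec_c_callfree (xs : List (List (String × String)))
    (h : ∀ m ∈ xs, pvIsCall m = false) :
    pvSpec .c xs = (match xs with | [] => false | m :: _ => pvIsToolM m) := by
  cases xs with
  | nil => rfl
  | cons m t =>
    have ht : ∀ m' ∈ t, pvIsCall m' = false := fun m' hm' => h m' (by simp [hm'])
    simp [pvSpec, h m (by simp)]
    by_cases hm : pvIsToolM m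
    · simp [hm, pvSpec_tt_callfree t ht]
    · simp [hm, pvSpec_dead_callfree false t ht]

lemma pvSpec_split (x : List (String × String)) (ys : List (List (String × String))) :
    ∀ t : List (List (String × String)), (∀ m ∈ t, pvIsCall m = false) → pvIsCall x = true →
      (pvSpec .c (t ++ x :: ys) = (t.all pvIsToolM && pvSpec .c ys)
       ∧ pvSpec .tt (t ++ x :: ys) = (t.all pvIsToolM && pvSpec .c ys)
       ∧ ∀ b, pvSpec (.dead b) (t ++ x :: ys) = false) := by
  intro t
  induction t with
  | nil => intro _ hx; simp [pvSpec, hx]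
  | cons m t ih =>
    intro h hx
    have ht : ∀ m' ∈ t, pvIsCall m' = false := fun m' hm' => h m' (by simp [hm'])
    obtain ⟨ih1, ih2, ih3⟩ := ih ht hx
    refine ⟨?_, ?_, ?_⟩ <;> simp [pvSpec, h m (by simp)] <;>
      by_cases hm : pvIsToolM m <;>
        simp [hm, ih2, ih3]

-- -------- A equals the automaton --------
lemma A_base (m : List (String × String)) (xs : List (List (String × String)))
    (hxs : ∀ m' ∈ xs, pvIsCall m' = false) (hm : pvIsCall m = true) :
    check_sequential_tools_py (m :: xs) = pvSpec .c xs := by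
  have hT : pvTI (m :: xs) = [0] := by
    rw [pvTI_cons, if_pos hm, pvTI_nil_of_callfree xs hxs]
    rfl
  have hL : PySem.List.pyGetD ([0] : List Int) (-1) 0 = 0 := by
    rw [PySem.List.pyGetD_neg_one _ _ (by simp)]
    rfl
  rw [A_eq_form, hT]
  simp only [List.isEmpty_cons, Bool.false_eq_true, if_false]
  rw [show pvChainAny (pvP (m :: xs)) [0] = false from rfl, hL, pvTail_cons_zero,
    pvSpec_c_callfree xs hxs]
  cases xs <;> rfl

lemma A_call_cons : ∀ n : Nat, ∀ xs : List (List (String × String)), xs.length ≤ n →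
    ∀ m, pvIsCall m = true → check_sequential_tools_py (m :: xs) = pvSpec .c xs := by
  intro n
  induction n with
  | zero =>
    intro xs hlen m hm
    have hnil : xs = [] := List.length_eq_zero_iff.mp (Nat.le_zero.mp hlen)
    subst hnil
    exact A_base m [] (by simp) hm
  | succ n ih =>
    intro xs hlen m hm
    by_cases hxc : ∀ m' ∈ xs, pvIsCall m' = false
    · exact A_base m xs hxc hm
    · obtain ⟨t, x, ys, rfl, ht, hx⟩ := pvFirstCall xs hxc
      rw [A_split m t x ys hm ht hx]
      have hys : ys.length ≤ n := by
        simp [List.length_append] at hlen; omega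
      rw [ih ys hys x hx]
      obtain ⟨h1, -, -⟩ := pvSpec_split x ys t ht hx
      rw [h1]

lemma A_eq_spec0 (conv : List (List (String × String))) :
    check_sequential_tools_py conv = pvSpec0 conv := by
  induction conv with
  | nil => rfl
  | cons m xs ih =>
    by_cases hm : pvIsCall m
    · rw [A_call_cons xs.length xs le_rfl m hm]
      simp [pvSpec0, hm]
    · rw [show pvSpec0 (m :: xs) = pvSpec0 xs by simp [pvSpec0, hm], ← ih]
      by_cases hxc : ∀ m' ∈ xs, pvIsCall m' = false
      · have hall : ∀ m' ∈ m :: xs, pvIsCall m' = false := by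
          intro m' hm'
          rcases List.mem_cons.mp hm' with rfl | h
          · simpa using hm
          · exact hxc m' h
        rw [A_noCall _ (pvTI_nil_of_callfree _ hall), A_noCall _ (pvTI_nil_of_callfree _ hxc)]
      · obtain ⟨t, x, ys, rfl, ht, hx⟩ := pvFirstCall xs hxc
        have hmt : ∀ m' ∈ m :: t, pvIsCall m' = false := by
          intro m' hm'
          rcases List.mem_cons.mp hm' with rfl | h
          · simpa using hm
          · exact ht m' h
        rw [show m :: (t ++ x :: ys) = (m :: t) ++ x :: ys by simp]
        rw [A_prefix (m :: t) x ys hmt hx, A_prefix t x ys ht hx]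

-- -------- B equals the automaton --------
def pvFinish (st : Bool × Bool × Bool × Option String) : Bool :=
  st.1 && st.2.1 && (st.2.2.2 == some "tool")

lemma pvStepB_eq (st : Bool × Bool × Bool × Option String) (m : List (String × String)) :
    pvStepB st m =
      (if pvIsCall m then (true, if st.1 && !st.2.2.1 then false else st.2.1, true, none)
       else if st.1 then
        (st.1, st.2.1, st.2.2.1 && (pvGet m "from" == "tool"),
          match st.2.2.2 with | none => some (pvGet m "from") | some v => some v)
       else st) := rfl

lemma foldB_false_btw : ∀ xs : List (List (String × String)), ∀ f r : Bool, ∀ a : Option String,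
    pvFinish (xs.foldl pvStepB (f, false, r, a)) = false := by
  intro xs
  induction xs with
  | nil => intro f r a; simp [pvFinish]
  | cons m t ih =>
    intro f r a
    rw [List.foldl_cons, pvStepB_eq]
    by_cases hc : pvIsCall m
    · simp [hc, ih]
    · by_cases hf : f = true <;> simp [hc, hf, ih]

lemma foldB_states : ∀ xs : List (List (String × String)),
    pvFinish (xs.foldl pvStepB (true, true, true, none)) = pvSpec .c xs
    ∧ pvFinish (xs.foldl pvStepB (true, true, true, some "tool")) = pvSpec .tt xs
    ∧ ∀ v, pvFinish (xs.foldl pvStepB (true, true, false, some v)) = pvSpec (.dead (v == "tool")) xs := by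
  intro xs
  induction xs with
  | nil =>
    refine ⟨?_, ?_, fun v => ?_⟩ <;> simp [pvFinish, pvSpec]
  | cons m t ih =>
    obtain ⟨ih1, ih2, ih3⟩ := ih
    by_cases hc : pvIsCall m
    · refine ⟨?_, ?_, fun v => ?_⟩ <;> rw [List.foldl_cons, pvStepB_eq] <;>
        simp [hc, pvSpec, ih1, foldB_false_btw]
    · by_cases htl : pvGet m "from" = "tool"
      · refine ⟨?_, ?_, fun v => ?_⟩ <;> rw [List.foldl_cons, pvStepB_eq] <;>
          simp [hc, htl, pvIsToolM, pvSpec, ih2, ih3]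
      · have hbeq : (pvGet m "from" == "tool") = false := beq_eq_false_iff_ne.mpr htl
        refine ⟨?_, ?_, fun v => ?_⟩ <;> rw [List.foldl_cons, pvStepB_eq] <;>
          simp [hc, hbeq, pvIsToolM, pvSpec, ih3]

lemma foldB_start : ∀ xs : List (List (String × String)),
    pvFinish (xs.foldl pvStepB (false, true, true, none)) = pvSpec0 xs := by
  intro xs
  induction xs with
  | nil => rfl
  | cons m t ih =>
    rw [List.foldl_cons, pvStepB_eq]
    by_cases hc : pvIsCall m
    · simp [hc, pvSpec0, (foldB_states t).1]
    · simp [hc, pvSpec0, ih]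

lemma B_eq_spec0 (conv : List (List (String × String))) :
    check_sequential_tools_py_alt conv = pvSpec0 conv := foldB_start conv

-- ===== VERDICT (by name: the statement is the Claim_ definition above) =====
theorem check_sequential_tools_py_spec : Claim_equal_check_sequential_tools_py := by
  intro conv _ _
  unfold Spec_check_sequential_tools_py
  rw [A_eq_spec0, B_eq_spec0]
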